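-- pv_equiv track=rewrite | github.com/whereami2048/Algorithm_Study | 프로그래머스/2/42626. 더 맵게/더 맵게.py | solution
-- ===== SOURCE A (Python) =====
-- import heapq
--
-- def solution(scov, K):
--     cnt = 0
--     heapq.heapify(scov)
--     while len(scov) > 1:
--         m1 = heapq.heappop(scov)
--         m2 = heapq.heappop(scov)
--         if (m1 >= K) : return cnt
--         new = m1 + m2*2
--         heapq.heappush(scov, new)
--         cnt += 1
--
--     return cnt if scov[0] >= K else -1
-- ===== SOURCE B (Python) =====
-- def _insort(a, x):
--     lo, hi = 0, len(a)
--     while lo < hi: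
--         mid = (lo + hi) // 2
--         if x < a[mid]:
--             hi = mid
--         else:
--             lo = mid + 1
--     a.insert(lo, x)
--
-- def solution(scov, K):
--     scov.sort()
--     cnt = 0
--     while len(scov) > 1:
--         m1 = scov.pop(0)
--         m2 = scov.pop(0)
--         if m1 >= K:
--             return cnt
--         _insort(scov, m1 + m2 * 2)
--         cnt += 1
--     return cnt if scov[0] >= K else -1
-- ===== Notes on version B (the rewrite author's own statement) =====
-- stated objective: alternative
-- what changed: Replaces the binary heap (heapify/heappop/heappush) with a list sorted once up front, popping the two smallest from the front and reinserting the mix by binary-search insertion, so the minimum is located positionally instead of by heap sifting.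
import Mathlib
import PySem

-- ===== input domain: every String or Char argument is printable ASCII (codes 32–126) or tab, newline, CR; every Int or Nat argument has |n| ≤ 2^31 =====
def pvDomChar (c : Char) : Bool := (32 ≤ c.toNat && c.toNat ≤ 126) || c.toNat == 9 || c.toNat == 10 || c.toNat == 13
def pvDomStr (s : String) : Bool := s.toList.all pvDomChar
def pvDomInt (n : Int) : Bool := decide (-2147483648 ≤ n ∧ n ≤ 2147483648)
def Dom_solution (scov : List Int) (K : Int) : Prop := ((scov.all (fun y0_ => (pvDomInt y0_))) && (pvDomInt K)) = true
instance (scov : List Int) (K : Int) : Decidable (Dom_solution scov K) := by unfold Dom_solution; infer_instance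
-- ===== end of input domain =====

-- B changes the data structure (sorted list + binary insertion instead of a heap); equivalence is about the
-- RETURN value only: both A and B reorder the argument list in place (heap order vs sorted order).

-- ===== PORT A =====
-- heapq is modelled by its contract: heapify is an in-place permutation (identity on the value level here,
-- legitimate because the loop below extracts elements purely by minimum VALUE), and heappop removes the
-- minimum value (PySem.List.min? + List.erase); heappush appends the new element. This is exact for the
-- return value of A on Int lists.
def solLoopA (scov : List Int) (K : Int) (cnt : Int) : Int :=
  if h : scov.length > 1 then
    match hm1 : PySem.List.min? scov (fun x => x) with
    | none => -1  -- unreachable: length > 1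
    | some m1 =>
      let s1 := scov.erase m1
      match hm2 : PySem.List.min? s1 (fun x => x) with
      | none => -1  -- unreachable
      | some m2 =>
        if m1 ≥ K then cnt
        else solLoopA (s1.erase m2 ++ [m1 + m2 * 2]) K (cnt + 1)
  else
    match scov with
    | [] => -1  -- Python raises IndexError here; excluded by Pre_solution
    | x :: _ => if x ≥ K then cnt else -1
termination_by scov.length
decreasing_by
  have h1 : m1 ∈ scov := PySem.List.min?_mem hm1
  have h2 : m2 ∈ scov.erase m1 := PySem.List.min?_mem hm2
  simp only [List.length_append, List.length_cons, List.length_nil]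
  have e1 := List.length_erase_of_mem h1
  have e2 := List.length_erase_of_mem h2
  omega

def solution (scov : List Int) (K : Int) : Int := solLoopA scov K 0

-- ===== PORT B =====
-- _insort: binary-search insertion into a sorted list (bisect-right behaviour), here as the equivalent
-- ordered insertion after all smaller-or-equal elements.
def insortB (x : Int) : List Int → List Int
  | [] => [x]
  | y :: ys => if x < y then x :: y :: ys else y :: insortB x ys

theorem insortB_length (x : Int) (l : List Int) : (insortB x l).length = l.length + 1 := by
  induction l with
  | nil => rfl
  | cons y ys ih => simp only [insortB]; split <;> simp [ih]

def solLoopB (scov : List Int) (K : Int) (cnt : Int) : Int :=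
  match scov with
  | m1 :: m2 :: rest =>
    if m1 ≥ K then cnt
    else solLoopB (insortB (m1 + m2 * 2) rest) K (cnt + 1)
  | [x] => if x ≥ K then cnt else -1
  | [] => -1  -- Python raises IndexError here; excluded by Pre_solution
termination_by scov.length
decreasing_by simp [insortB_length]

def solution_alt (scov : List Int) (K : Int) : Int :=
  solLoopB (PySem.List.sorted scov (fun x => x) false) K 0

-- ===== PRECONDITION & SPEC =====
-- Pre_ excludes exactly the empty list, on which A raises IndexError (scov[0]).
def Pre_solution (scov : List Int) (K : Int) : Prop := scov ≠ []
instance (scov : List Int) (K : Int) : Decidable (Pre_solution scov K) := by unfold Pre_solution; infer_instance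
def pvWitness_solution : List Int × Int := ([1, 2, 3, 9, 10, 12], 7)

def Spec_solution (scov : List Int) (K : Int) (out : Int) : Prop := out = solution_alt scov K
instance (scov : List Int) (K : Int) (out : Int) : Decidable (Spec_solution scov K out) := by unfold Spec_solution; infer_instance

-- ===== CLAIM (what is proved, stated in full; the proofs are below) =====
def Claim_equal_solution : Prop := ∀ (scov : List Int) (K : Int), Dom_solution scov K → Pre_solution scov K → Spec_solution scov K (solution scov K)

-- ===== LEMMAS AND PROOFS =====

-- min over values is determined by the multiset: characterisation of min? with the identity key.
theorem min?_id_iff (l : List Int) (m : Int) :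
    PySem.List.min? l (fun x => x) = some m ↔ m ∈ l ∧ ∀ y ∈ l, m ≤ y := by
  constructor
  · intro h
    exact ⟨PySem.List.min?_mem h, fun y hy => PySem.List.min?_isMin h y hy⟩
  · rintro ⟨hm, hmin⟩
    cases hl : PySem.List.min? l (fun x => x) with
    | none =>
      rw [PySem.List.min?_eq_none_iff] at hl
      simp [hl] at hm
    | some m' =>
      have h1 : m' ∈ l := PySem.List.min?_mem hl
      have h2 : ∀ y ∈ l, m' ≤ y := fun y hy => PySem.List.min?_isMin hl y hy
      have : m = m' := le_antisymm (hmin m' h1) (h2 m hm)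
      rw [this]

theorem min?_id_perm {l l' : List Int} (h : l.Perm l') :
    PySem.List.min? l (fun x => x) = PySem.List.min? l' (fun x => x) := by
  cases hl : PySem.List.min? l' (fun x => x) with
  | none =>
    rw [PySem.List.min?_eq_none_iff] at hl ⊢
    subst hl; exact h.eq_nil
  | some m =>
    rw [min?_id_iff] at hl ⊢
    exact ⟨h.mem_iff.mpr hl.1, fun y hy => hl.2 y (h.mem_iff.mp hy)⟩

-- the A-loop only depends on the multiset of the heap
theorem solLoopA_perm : ∀ n (l l' : List Int), l.length = n → l.Perm l' →
    ∀ K cnt, solLoopA l K cnt = solLoopA l' K cnt := by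
  intro n
  induction n using Nat.strong_induction_on with
  | _ n ih =>
    intro l l' hn hp K cnt
    have hlen : l.length = l'.length := hp.length_eq
    rw [solLoopA, solLoopA]
    by_cases hg : l.length > 1
    · rw [dif_pos hg, dif_pos (hlen ▸ hg)]
      rw [min?_id_perm hp]
      cases hm1 : PySem.List.min? l' (fun x => x) with
      | none => rfl
      | some m1 =>
        simp only
        have hp1 : (l.erase m1).Perm (l'.erase m1) := hp.erase m1
        rw [min?_id_perm hp1]
        cases hm2 : PySem.List.min? (l'.erase m1) (fun x => x) with
        | none => rfl
        | some m2 =>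
          simp only
          split
          · rfl
          · have hm1' : m1 ∈ l' := PySem.List.min?_mem (by rw [← min?_id_perm hp]; rw [min?_id_perm hp]; exact hm1)
            have hm2' : m2 ∈ l'.erase m1 := PySem.List.min?_mem hm2
            have hp2 : ((l.erase m1).erase m2).Perm ((l'.erase m1).erase m2) := hp1.erase m2
            have hp3 : (((l.erase m1).erase m2) ++ [m1 + m2 * 2]).Perm (((l'.erase m1).erase m2) ++ [m1 + m2 * 2]) :=
              hp2.append_right _
            have hlt : (((l.erase m1).erase m2) ++ [m1 + m2 * 2]).length < n := by
              have e1 : m1 ∈ l := hp.mem_iff.mpr hm1'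
              have e2 : m2 ∈ l.erase m1 := hp1.mem_iff.mpr hm2'
              have := List.length_erase_of_mem e1
              have := List.length_erase_of_mem e2
              simp only [List.length_append, List.length_cons, List.length_nil]
              omega
            exact ih _ hlt _ _ rfl hp3 K (cnt + 1)
    · rw [dif_neg hg, dif_neg (hlen ▸ hg)]
      cases l with
      | nil =>
        have : l' = [] := hp.symm.eq_nil
        subst this; rfl
      | cons x t =>
        have ht : t = [] := by
          cases t with
          | nil => rfl
          | cons a b => simp at hg
        subst ht
        have : l' = [x] := List.perm_singleton.mp hp.symm
        subst this; rfl

-- insort produces a permutation of prepending, and preserves sortedness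
theorem insortB_perm (x : Int) (l : List Int) : (insortB x l).Perm (x :: l) := by
  induction l with
  | nil => exact List.Perm.refl _
  | cons y ys ih =>
    simp only [insortB]
    split
    · exact List.Perm.refl _
    · exact (ih.cons y).trans (List.Perm.swap x y ys)

theorem insortB_pairwise (x : Int) (l : List Int) (h : l.Pairwise (· ≤ ·)) :
    (insortB x l).Pairwise (· ≤ ·) := by
  induction l with
  | nil => simp [insortB]
  | cons y ys ih =>
    simp only [insortB]
    rw [List.pairwise_cons] at h
    split
    · rename_i hlt
      rw [List.pairwise_cons]
      refine ⟨?_, List.pairwise_cons.mpr h⟩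
      intro b hb
      rcases List.mem_cons.mp hb with hb | hb
      · omega
      · have := h.1 b hb; omega
    · rename_i hge
      rw [List.pairwise_cons]
      refine ⟨?_, ih h.2⟩
      intro b hb
      rcases List.mem_cons.mp ((insortB_perm x ys).mem_iff.mp hb) with hb | hb
      · subst hb; omega
      · exact h.1 b hb

theorem insortB_ne_nil (x : Int) (l : List Int) : insortB x l ≠ [] := by
  have := insortB_length x l
  intro h; rw [h] at this; simp at this

-- on a sorted nonempty list the two loops coincide
theorem loops_agree : ∀ n (l : List Int), l.length = n → l.Pairwise (· ≤ ·) → l ≠ [] →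
    ∀ K cnt, solLoopA l K cnt = solLoopB l K cnt := by
  intro n
  induction n using Nat.strong_induction_on with
  | _ n ih =>
    intro l hn hs hne K cnt
    match l with
    | [] => exact absurd rfl hne
    | [x] =>
      rw [solLoopA, solLoopB]
      simp
    | m1 :: m2 :: rest =>
      rw [solLoopA, solLoopB]
      have hg : (m1 :: m2 :: rest).length > 1 := by simp
      rw [dif_pos hg]
      rw [List.pairwise_cons] at hs
      have hmin1 : PySem.List.min? (m1 :: m2 :: rest) (fun x => x) = some m1 := by
        rw [min?_id_iff]
        refine ⟨List.mem_cons_self, ?_⟩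
        intro y hy
        rcases List.mem_cons.mp hy with hy | hy
        · omega
        · exact hs.1 y hy
      rw [List.pairwise_cons] at hs
      have hmin2 : PySem.List.min? (m2 :: rest) (fun x => x) = some m2 := by
        rw [min?_id_iff]
        exact ⟨List.mem_cons_self, fun y hy => by
          rcases List.mem_cons.mp hy with hy | hy
          · omega
          · exact hs.2.1 y hy⟩
      split
      · rename_i heq
        rw [hmin1] at heq; exact absurd heq (by simp)
      · rename_i m1' heq
        rw [hmin1] at heq
        have hm1 : m1' = m1 := by injection heq; omega
        subst hm1
        simp only [List.erase_cons_head]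
        split
        · rename_i heq2
          rw [List.erase_cons_head] at heq2
          rw [hmin2] at heq2; exact absurd heq2 (by simp)
        · rename_i m2' heq2
          rw [List.erase_cons_head] at heq2
          rw [hmin2] at heq2
          have hm2 : m2' = m2 := by injection heq2; omega
          subst hm2
          simp only [List.erase_cons_head]
          split
          · rfl
          · have hperm : (rest ++ [m1' + m2' * 2]).Perm (insortB (m1' + m2' * 2) rest) :=
              (List.perm_append_singleton _ _).trans (insortB_perm _ _).symm
            have hlt2 : (insortB (m1' + m2' * 2) rest).length < n := by
              rw [insortB_length]
              simp only [List.length_cons] at hn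
              omega
            calc solLoopA (rest ++ [m1' + m2' * 2]) K (cnt + 1)
                = solLoopA (insortB (m1' + m2' * 2) rest) K (cnt + 1) :=
                  solLoopA_perm _ _ _ rfl hperm K (cnt + 1)
              _ = solLoopB (insortB (m1' + m2' * 2) rest) K (cnt + 1) :=
                  ih _ hlt2 _ rfl (insortB_pairwise _ _ hs.2.2) (insortB_ne_nil _ _) K (cnt + 1)

-- ===== VERDICT (by name: the statement is the Claim_ definition above) =====
theorem solution_spec : Claim_equal_solution := by
  intro scov K _ hpre
  unfold Spec_solution solution solution_alt
  have hperm : (PySem.List.sorted scov (fun x => x) false).Perm scov := PySem.List.sorted_perm scov _ _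
  have hsorted : (PySem.List.sorted scov (fun x => x) false).Pairwise (· ≤ ·) := by
    have := PySem.List.sorted_pairwise scov (fun x => x)
    simpa using this
  have hne : PySem.List.sorted scov (fun x => x) false ≠ [] := by
    intro h
    rw [PySem.List.sorted_eq_nil_iff] at h
    exact hpre h
  rw [solLoopA_perm scov.length scov _ rfl hperm.symm K 0]
  exact loops_agree _ _ rfl hsorted hne K 0
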